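-- pv_equiv track=rewrite | github.com/alanddalusi/cracker | cracker.py | generate_passwords_from_pattern
-- ===== SOURCE A (Python) =====
-- import itertools
-- import string
--
-- CHARSET_MAP = {
--     "lower":        string.ascii_lowercase,
--     "upper":        string.ascii_uppercase,
--     "digits":       string.digits,
--     "lower+digits": string.ascii_lowercase + string.digits,
--     "upper+digits": string.ascii_uppercase + string.digits,
--     "alpha":        string.ascii_letters,
--     "alpha+digits": string.ascii_letters + string.digits,
--     "all":          string.ascii_letters + string.digits + "!@#$%&*._-",
--     "special":      "!@#$%^&*()_+-=[]{}|;:',.<>?/~`",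
-- }
--
-- def generate_passwords_from_pattern(pattern, charset="lower"):
--     """Genera contraseñas a partir de un patrón."""
--     cs = CHARSET_MAP.get(charset, charset)
--
--     char_sets = []
--     for ch in pattern:
--         if ch == '?':
--             char_sets.append(cs)
--         elif ch == '#':
--             char_sets.append(string.digits)
--         elif ch == '*':
--             char_sets.append(string.ascii_lowercase + string.digits)
--         else:
--             char_sets.append(ch)
--
--     for combo in itertools.product(*char_sets):
--         yield ''.join(combo)
-- ===== SOURCE B (Python) =====
-- def generate_passwords_from_pattern(pattern, charset="lower"):
--     """Genera contraseñas a partir de un patrón."""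
--     # resolve named charset by an explicit chain instead of a dict lookup
--     if charset == "lower":
--         cs = "abcdefghijklmnopqrstuvwxyz"
--     elif charset == "upper":
--         cs = "ABCDEFGHIJKLMNOPQRSTUVWXYZ"
--     elif charset == "digits":
--         cs = "0123456789"
--     elif charset == "lower+digits":
--         cs = "abcdefghijklmnopqrstuvwxyz0123456789"
--     elif charset == "upper+digits":
--         cs = "ABCDEFGHIJKLMNOPQRSTUVWXYZ0123456789"
--     elif charset == "alpha":
--         cs = "abcdefghijklmnopqrstuvwxyzABCDEFGHIJKLMNOPQRSTUVWXYZ"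
--     elif charset == "alpha+digits":
--         cs = "abcdefghijklmnopqrstuvwxyzABCDEFGHIJKLMNOPQRSTUVWXYZ0123456789"
--     elif charset == "all":
--         cs = "abcdefghijklmnopqrstuvwxyzABCDEFGHIJKLMNOPQRSTUVWXYZ0123456789!@#$%&*._-"
--     elif charset == "special":
--         cs = "!@#$%^&*()_+-=[]{}|;:',.<>?/~`"
--     else:
--         cs = charset
--
--     def set_for(ch):
--         if ch == '?':
--             return cs
--         if ch == '#':
--             return "0123456789"
--         if ch == '*':
--             return "abcdefghijklmnopqrstuvwxyz0123456789"
--         return ch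
--
--     # build suffixes right-to-left: each step prepends every candidate character,
--     # so the last pattern position varies fastest (product's odometer order)
--     suffixes = [""]
--     for ch in reversed(pattern):
--         suffixes = [c + suf for c in set_for(ch) for suf in suffixes]
--
--     yield from suffixes
-- ===== Notes on version B (the rewrite author's own statement) =====
-- stated objective: alternative
-- what changed: B builds no char_sets list and does not use itertools.product: it resolves the named charset with an explicit if/elif chain and builds the passwords as suffixes by a single right-to-left pass over the pattern, prepending each candidate character (last position varies fastest), versus A's parse-then-left-to-right-product pipeline.
import Mathlib
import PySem

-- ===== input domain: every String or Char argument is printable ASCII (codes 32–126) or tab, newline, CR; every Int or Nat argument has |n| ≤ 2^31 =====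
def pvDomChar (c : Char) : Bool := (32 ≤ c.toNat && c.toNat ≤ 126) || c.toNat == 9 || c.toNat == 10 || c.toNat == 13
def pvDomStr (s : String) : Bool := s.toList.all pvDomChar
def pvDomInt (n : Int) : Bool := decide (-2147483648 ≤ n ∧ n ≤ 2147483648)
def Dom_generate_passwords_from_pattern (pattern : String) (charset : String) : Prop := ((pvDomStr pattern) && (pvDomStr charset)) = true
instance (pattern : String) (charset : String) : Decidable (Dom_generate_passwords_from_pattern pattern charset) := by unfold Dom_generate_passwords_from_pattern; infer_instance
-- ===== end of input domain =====

-- B drops the char_sets list and itertools.product: it resolves the charset with an if-chain and builds the passwords as suffixes in one right-to-left pass over the pattern (same outputs, same order); objective: alternative decomposition. Python A/B are generators; equivalence is about the emitted sequence as a list.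


-- ===== PORT A =====
def pvAsciiLower : String := "abcdefghijklmnopqrstuvwxyz"
def pvAsciiUpper : String := "ABCDEFGHIJKLMNOPQRSTUVWXYZ"
def pvDigits : String := "0123456789"

def pvCharsetMap : PySem.Dict String String := PySem.Dict.ofList
  [("lower", pvAsciiLower), ("upper", pvAsciiUpper), ("digits", pvDigits),
   ("lower+digits", pvAsciiLower ++ pvDigits), ("upper+digits", pvAsciiUpper ++ pvDigits),
   ("alpha", pvAsciiLower ++ pvAsciiUpper), ("alpha+digits", pvAsciiLower ++ pvAsciiUpper ++ pvDigits),
   ("all", pvAsciiLower ++ pvAsciiUpper ++ pvDigits ++ "!@#$%&*._-"),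
   ("special", "!@#$%^&*()_+-=[]{}|;:',.<>?/~`")]

-- parsing loop of A building char_sets
def pvCharSets (pattern : String) (cs : String) : List String :=
  pattern.toList.foldl (fun acc ch =>
    if ch = '?' then acc ++ [cs]
    else if ch = '#' then acc ++ [pvDigits]
    else if ch = '*' then acc ++ [pvAsciiLower ++ pvDigits]
    else acc ++ [String.ofList [ch]]) []

-- itertools.product over the char sets, odometer order (rightmost fastest)
def generate_passwords_from_pattern (pattern : String) (charset : String) : List String :=
  let cs := PySem.Dict.getD pvCharsetMap charset charset
  let char_sets := pvCharSets pattern cs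
  char_sets.foldl (fun acc s => acc.flatMap (fun p => s.toList.map (fun c => p.push c))) [""]

-- ===== PORT B =====
-- B's if/elif chain resolving a named charset
def pvResolve (charset : String) : String :=
  if charset = "lower" then "abcdefghijklmnopqrstuvwxyz"
  else if charset = "upper" then "ABCDEFGHIJKLMNOPQRSTUVWXYZ"
  else if charset = "digits" then "0123456789"
  else if charset = "lower+digits" then "abcdefghijklmnopqrstuvwxyz0123456789"
  else if charset = "upper+digits" then "ABCDEFGHIJKLMNOPQRSTUVWXYZ0123456789"
  else if charset = "alpha" then "abcdefghijklmnopqrstuvwxyzABCDEFGHIJKLMNOPQRSTUVWXYZ"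
  else if charset = "alpha+digits" then "abcdefghijklmnopqrstuvwxyzABCDEFGHIJKLMNOPQRSTUVWXYZ0123456789"
  else if charset = "all" then "abcdefghijklmnopqrstuvwxyzABCDEFGHIJKLMNOPQRSTUVWXYZ0123456789!@#$%&*._-"
  else if charset = "special" then "!@#$%^&*()_+-=[]{}|;:',.<>?/~`"
  else charset

-- B's set_for helper: the candidate characters for one pattern character
def pvSetFor (cs : String) (ch : Char) : String :=
  if ch = '?' then cs
  else if ch = '#' then "0123456789"
  else if ch = '*' then "abcdefghijklmnopqrstuvwxyz0123456789"
  else String.ofList [ch]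

-- B's right-to-left suffix builder, one pass over the reversed pattern
def generate_passwords_from_pattern_alt (pattern : String) (charset : String) : List String :=
  pattern.toList.reverse.foldl
    (fun suffixes ch =>
      (pvSetFor (pvResolve charset) ch).toList.flatMap
        (fun c => suffixes.map (fun suf => String.ofList [c] ++ suf))) [""]

-- ===== PRECONDITION & SPEC =====
def Spec_generate_passwords_from_pattern (pattern : String) (charset : String) (out : List String) : Prop := out = generate_passwords_from_pattern_alt pattern charset
instance (pattern : String) (charset : String) (out : List String) : Decidable (Spec_generate_passwords_from_pattern pattern charset out) := by unfold Spec_generate_passwords_from_pattern; infer_instance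

-- ===== CLAIM =====
def Claim_equal_generate_passwords_from_pattern : Prop := ∀ (pattern : String) (charset : String), Dom_generate_passwords_from_pattern pattern charset → Spec_generate_passwords_from_pattern pattern charset (generate_passwords_from_pattern pattern charset)

-- ===== LEMMAS AND PROOFS =====
set_option maxHeartbeats 1000000 in
lemma resolve_eq (charset : String) :
    PySem.Dict.getD pvCharsetMap charset charset = pvResolve charset := by
  have hmap : pvCharsetMap = PySem.Dict.mk
    [("lower", "abcdefghijklmnopqrstuvwxyz"), ("upper", "ABCDEFGHIJKLMNOPQRSTUVWXYZ"), ("digits", "0123456789"),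
     ("lower+digits", "abcdefghijklmnopqrstuvwxyz0123456789"), ("upper+digits", "ABCDEFGHIJKLMNOPQRSTUVWXYZ0123456789"),
     ("alpha", "abcdefghijklmnopqrstuvwxyzABCDEFGHIJKLMNOPQRSTUVWXYZ"),
     ("alpha+digits", "abcdefghijklmnopqrstuvwxyzABCDEFGHIJKLMNOPQRSTUVWXYZ0123456789"),
     ("all", "abcdefghijklmnopqrstuvwxyzABCDEFGHIJKLMNOPQRSTUVWXYZ0123456789!@#$%&*._-"),
     ("special", "!@#$%^&*()_+-=[]{}|;:',.<>?/~`")] := by rfl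
  rw [hmap]
  by_cases h1 : charset = "lower"
  · subst h1; rfl
  by_cases h2 : charset = "upper"
  · subst h2; rfl
  by_cases h3 : charset = "digits"
  · subst h3; rfl
  by_cases h4 : charset = "lower+digits"
  · subst h4; rfl
  by_cases h5 : charset = "upper+digits"
  · subst h5; rfl
  by_cases h6 : charset = "alpha"
  · subst h6; rfl
  by_cases h7 : charset = "alpha+digits"
  · subst h7; rfl
  by_cases h8 : charset = "all"
  · subst h8; rfl
  by_cases h9 : charset = "special"
  · subst h9; rfl
  simp [PySem.Dict.getD, PySem.Dict.get?, pvResolve, h1, h2, h3, h4, h5, h6, h7, h8, h9, Ne.symm h1, Ne.symm h2, Ne.symm h3, Ne.symm h4, Ne.symm h5, Ne.symm h6, Ne.symm h7, Ne.symm h8, Ne.symm h9]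

-- the char_sets loop is a map of set_for
lemma charSets_loop (cs : String) (l : List Char) (acc : List String) :
    l.foldl (fun acc ch =>
      if ch = '?' then acc ++ [cs]
      else if ch = '#' then acc ++ [pvDigits]
      else if ch = '*' then acc ++ [pvAsciiLower ++ pvDigits]
      else acc ++ [String.ofList [ch]]) acc
      = acc ++ l.map (pvSetFor cs) := by
  induction l generalizing acc with
  | nil => simp
  | cons ch rest ih =>
      simp only [List.foldl_cons, List.map_cons]
      rw [ih]
      unfold pvSetFor
      split_ifs <;> simp [pvDigits, pvAsciiLower]

lemma charSets_eq_map (pattern : String) (cs : String) :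
    pvCharSets pattern cs = pattern.toList.map (pvSetFor cs) := by
  unfold pvCharSets
  rw [charSets_loop]
  rfl

lemma push_append (p : String) (c : Char) (suf : String) :
    (p.push c) ++ suf = p ++ (String.ofList [c] ++ suf) := by
  apply String.ext
  simp

-- the suffix product (foldr form) that both sides compute
def pvProd (css : List String) : List String :=
  css.foldr (fun s acc => s.toList.flatMap (fun c => acc.map (fun suf => String.ofList [c] ++ suf))) [""]

lemma foldl_product_eq_prod (css : List String) (ps : List String) :
    css.foldl (fun acc s => acc.flatMap (fun p => s.toList.map (fun c => p.push c))) ps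
      = ps.flatMap (fun p => (pvProd css).map (fun suf => p ++ suf)) := by
  induction css generalizing ps with
  | nil => simp [pvProd]
  | cons s rest ih =>
      simp only [List.foldl_cons, ih, pvProd, List.foldr_cons]
      simp [List.flatMap_assoc, List.flatMap_map, List.map_flatMap, List.map_map,
        Function.comp_def, push_append]

lemma alt_eq_prod (pattern : String) (cs : String) :
    pattern.toList.reverse.foldl
      (fun suffixes ch =>
        (pvSetFor cs ch).toList.flatMap
          (fun c => suffixes.map (fun suf => String.ofList [c] ++ suf))) [""]
      = pvProd (pattern.toList.map (pvSetFor cs)) := by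
  rw [List.foldl_reverse]
  unfold pvProd
  rw [List.foldr_map]

-- ===== VERDICT =====
theorem generate_passwords_from_pattern_spec : Claim_equal_generate_passwords_from_pattern := by
  intro pattern charset _
  unfold Spec_generate_passwords_from_pattern generate_passwords_from_pattern generate_passwords_from_pattern_alt
  simp only [resolve_eq, charSets_eq_map, foldl_product_eq_prod, alt_eq_prod]
  simp
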